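-- pv_equiv track=rewrite | github.com/luckynozomi/ChemProt-BioCreative | DrugProtUsingPeiYao/src/Abs2Triplets.py | remove_subset_entities
-- ===== SOURCE A (Python) =====
-- def remove_subset_entities(entity_list):
--     # 2nd filter: remove any entities that is a subset of any entity in entity_list
--     ret_entity_list = []
--     any_entity_removed = False
--     for this_entity in entity_list:
--         this_arg, this_start, this_end, this_name = this_entity
--         flagged_for_removal = False
--         for that_entity in entity_list:
--             that_arg, that_start, that_end, that_name = that_entity
--             if this_arg == that_arg:
--                 continue
--             if that_start <= this_start and this_end <= that_end:
--                 flagged_for_removal = True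
--                 any_entity_removed = True
--         if not flagged_for_removal:
--             ret_entity_list.append(this_entity)
--     return any_entity_removed, ret_entity_list
-- ===== SOURCE B (Python) =====
-- def remove_subset_entities(entity_list):
--     # Sort-and-sweep re-implementation: sort (index, entity) pairs by start,
--     # sweep start-groups left to right keeping the max end seen so far together
--     # with the max end among entities whose arg differs from the current champion;
--     # O(n log n) instead of A's O(n^2) all-pairs scan.
--     pairs = sorted(enumerate(entity_list), key=lambda p: p[1][1])
--     removed = [False] * len(entity_list)
--     best = None          # (arg, end) of an entity achieving the max end among processed
--     best_other = None    # max end among processed entities whose arg differs from best[0]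
--     pos = 0
--     while pos < len(pairs):
--         start = pairs[pos][1][1]
--         grp_end = pos
--         while grp_end < len(pairs) and pairs[grp_end][1][1] == start:
--             grp_end += 1
--         for k in range(pos, grp_end):
--             arg, _, end, _ = pairs[k][1]
--             if best is None:
--                 best = (arg, end)
--             elif arg == best[0]:
--                 if end > best[1]:
--                     best = (arg, end)
--             elif end > best[1]:
--                 best_other = best[1]
--                 best = (arg, end)
--             else:
--                 best_other = end if best_other is None else max(best_other, end)
--         for k in range(pos, grp_end):
--             idx = pairs[k][0]
--             arg, _, end, _ = pairs[k][1]
--             if best[0] != arg: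
--                 if end <= best[1]:
--                     removed[idx] = True
--             elif best_other is not None and end <= best_other:
--                 removed[idx] = True
--         pos = grp_end
--     kept = [e for e, r in zip(entity_list, removed) if not r]
--     return any(removed), kept
-- ===== Notes on version B (the rewrite author's own statement) =====
-- stated objective: faster
-- what changed: Replaces A's quadratic all-pairs containment scan by sorting the entities by start position and doing one left-to-right sweep over start-groups that maintains the maximum end seen so far together with the maximum end among entities whose arg differs from the current champion's arg.
import Mathlib
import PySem

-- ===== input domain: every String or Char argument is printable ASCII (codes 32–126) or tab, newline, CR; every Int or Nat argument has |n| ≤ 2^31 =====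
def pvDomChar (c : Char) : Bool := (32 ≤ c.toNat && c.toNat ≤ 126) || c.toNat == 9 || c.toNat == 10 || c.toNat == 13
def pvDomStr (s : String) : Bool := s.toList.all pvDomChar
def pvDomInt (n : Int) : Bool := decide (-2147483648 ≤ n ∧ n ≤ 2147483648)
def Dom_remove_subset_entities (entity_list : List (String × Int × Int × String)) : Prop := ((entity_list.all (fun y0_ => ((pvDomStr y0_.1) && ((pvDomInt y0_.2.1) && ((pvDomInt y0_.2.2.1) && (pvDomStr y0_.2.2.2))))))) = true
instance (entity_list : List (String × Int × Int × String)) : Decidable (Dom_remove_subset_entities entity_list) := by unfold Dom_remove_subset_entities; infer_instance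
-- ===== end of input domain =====

-- B replaces A's quadratic all-pairs containment scan by sort-by-start plus a single
-- sweep maintaining the max end so far (and the max end under a different arg).

-- ===== PORT A =====
-- Literal port of A: outer loop over entity_list with state (any_entity_removed, ret_entity_list),
-- inner loop over entity_list with state (flagged_for_removal, any_entity_removed).
def remove_subset_entities (entity_list : List (String × Int × Int × String)) : Bool × (List (String × Int × Int × String)) :=
  let r := entity_list.foldl
    (fun (acc : Bool × List (String × Int × Int × String)) t =>
      let inner := entity_list.foldl
        (fun (p : Bool × Bool) f =>
          if t.1 == f.1 then p
          else if decide (f.2.1 ≤ t.2.1) && decide (t.2.2.1 ≤ f.2.2.1) then (true, true)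
          else p)
        (false, acc.1)
      (inner.2, if inner.1 then acc.2 else acc.2 ++ [t]))
    (false, ([] : List (String × Int × Int × String)))
  r

-- ===== PORT B =====
-- B-side helpers: sweep state is (best, best_other) = (Option (arg, end), Option end).
def bAdd (st : Option (String × Int) × Option Int) (e : String × Int × Int × String) :
    Option (String × Int) × Option Int :=
  match st with
  | (none, b2) => (some (e.1, e.2.2.1), b2)
  | (some (a1, e1), b2) =>
    if e.1 == a1 then
      if e1 < e.2.2.1 then (some (e.1, e.2.2.1), b2) else (some (a1, e1), b2)
    else if e1 < e.2.2.1 then (some (e.1, e.2.2.1), some e1)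
    else
      match b2 with
      | none => (some (a1, e1), some e.2.2.1)
      | some m => (some (a1, e1), some (max m e.2.2.1))

def bQry (st : Option (String × Int) × Option Int) (e : String × Int × Int × String) : Bool :=
  match st with
  | (none, _) => false
  | (some (a1, e1), b2) =>
    if a1 != e.1 then decide (e.2.2.1 ≤ e1)
    else
      match b2 with
      | none => false
      | some m => decide (e.2.2.1 ≤ m)

-- the while-loop over start-groups: take the run of equal starts, feed it into the
-- state, then mark each member of the run whose interval is dominated.
def bSweep : List (Int × (String × Int × Int × String)) →
    (Option (String × Int) × Option Int) → List Bool → List Bool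
  | [], _, rm => rm
  | q :: rest, st, rm =>
    let run := (q :: rest).takeWhile (fun p => p.2.2.1 == q.2.2.1)
    let rest' := (q :: rest).dropWhile (fun p => p.2.2.1 == q.2.2.1)
    let st' := run.foldl (fun a p => bAdd a p.2) st
    let rm' := run.foldl (fun r p => if bQry st' p.2 then r.set p.1.toNat true else r) rm
    bSweep rest' st' rm'
  termination_by M _ _ => M.length
  decreasing_by
    simp only [List.dropWhile_cons, beq_self_eq_true, if_pos]
    have := List.length_dropWhile_le (fun p : Int × (String × Int × Int × String) => p.2.2.1 == q.2.2.1) rest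
    simp only [List.length_cons]
    omega

def remove_subset_entities_alt (entity_list : List (String × Int × Int × String)) : Bool × (List (String × Int × Int × String)) :=
  let pairs := PySem.List.sorted (PySem.List.enumerate entity_list) (fun p => p.2.2.1) false
  let removed := bSweep pairs (none, none) (List.replicate entity_list.length false)
  (removed.any id, ((entity_list.zip removed).filter (fun p => !p.2)).map (·.1))

-- ===== PRECONDITION & SPEC =====
def Spec_remove_subset_entities (entity_list : List (String × Int × Int × String)) (out : Bool × (List (String × Int × Int × String))) : Prop := out = remove_subset_entities_alt entity_list
instance (entity_list : List (String × Int × Int × String)) (out : Bool × (List (String × Int × Int × String))) : Decidable (Spec_remove_subset_entities entity_list out) := by unfold Spec_remove_subset_entities; infer_instance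

-- ===== CLAIM (what is proved, stated in full; the proofs are below) =====
def Claim_equal_remove_subset_entities : Prop := ∀ (entity_list : List (String × Int × Int × String)), Dom_remove_subset_entities entity_list → Spec_remove_subset_entities entity_list (remove_subset_entities entity_list)

-- ===== LEMMAS AND PROOFS =====

-- the common specification: t is contained in some other-arg entity of xs
def cont (xs : List (String × Int × Int × String)) (t : String × Int × Int × String) : Bool :=
  xs.any (fun f => !(t.1 == f.1) && (decide (f.2.1 ≤ t.2.1) && decide (t.2.2.1 ≤ f.2.2.1)))

theorem cont_iff (xs : List (String × Int × Int × String)) (t : String × Int × Int × String) :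
    cont xs t = true ↔ ∃ f ∈ xs, ¬(t.1 = f.1) ∧ f.2.1 ≤ t.2.1 ∧ t.2.2.1 ≤ f.2.2.1 := by
  simp [cont]

-- ---- A-side ----
theorem innerA (xs : List (String × Int × Int × String)) (t : String × Int × Int × String)
    (fl ar : Bool) :
    xs.foldl (fun (p : Bool × Bool) f =>
        if t.1 == f.1 then p
        else if decide (f.2.1 ≤ t.2.1) && decide (t.2.2.1 ≤ f.2.2.1) then (true, true)
        else p) (fl, ar)
      = (fl || cont xs t, ar || cont xs t) := by
  induction xs generalizing fl ar with
  | nil => simp [cont]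
  | cons f tail ih =>
    simp only [List.foldl_cons, cont, List.any_cons]
    by_cases h1 : t.1 == f.1
    · simp only [h1, if_pos rfl]
      rw [ih]
      simp [cont, h1]
    · simp only [h1]
      rw [if_neg (by simp [h1])]
      by_cases h2 : (decide (f.2.1 ≤ t.2.1) && decide (t.2.2.1 ≤ f.2.2.1)) = true
      · rw [if_pos h2, ih]
        simp [cont, h1, h2]
      · rw [if_neg h2, ih]
        simp only [Bool.not_eq_true] at h2
        simp [cont, h1, h2]

theorem outerA (xs ys : List (String × Int × Int × String)) (ar : Bool)
    (acc : List (String × Int × Int × String)) :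
    ys.foldl (fun (acc : Bool × List (String × Int × Int × String)) t =>
      let inner := xs.foldl
        (fun (p : Bool × Bool) f =>
          if t.1 == f.1 then p
          else if decide (f.2.1 ≤ t.2.1) && decide (t.2.2.1 ≤ f.2.2.1) then (true, true)
          else p)
        (false, acc.1)
      (inner.2, if inner.1 then acc.2 else acc.2 ++ [t])) (ar, acc)
    = (ar || ys.any (cont xs), acc ++ ys.filter (fun t => !cont xs t)) := by
  induction ys generalizing ar acc with
  | nil => simp
  | cons t tail ih =>
    simp only [List.foldl_cons]
    rw [innerA]
    simp only [Bool.false_or]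
    rw [ih]
    by_cases h : cont xs t = true
    · simp [h, List.filter_cons, Bool.or_assoc]
    · simp only [Bool.not_eq_true] at h
      simp [h, List.filter_cons, Bool.or_assoc]

theorem A_eq (xs : List (String × Int × Int × String)) :
    remove_subset_entities xs = (xs.any (cont xs), xs.filter (fun t => !cont xs t)) := by
  unfold remove_subset_entities
  rw [outerA]
  simp

-- ---- B-side ----
-- state invariant: best = (arg, end) of a max-end processed entity; best_other = the
-- max end among processed entities whose arg differs from best's arg
def InvB (st : Option (String × Int) × Option Int)
    (P : List (String × Int × Int × String)) : Prop :=
  match st with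
  | (none, b2) => P = [] ∧ b2 = none
  | (some (a1, e1), b2) =>
    (∃ f ∈ P, f.1 = a1 ∧ f.2.2.1 = e1) ∧ (∀ f ∈ P, f.2.2.1 ≤ e1) ∧
    (match b2 with
     | none => ∀ f ∈ P, f.1 = a1
     | some m => (∃ f ∈ P, ¬(f.1 = a1) ∧ f.2.2.1 = m) ∧ (∀ f ∈ P, ¬(f.1 = a1) → f.2.2.1 ≤ m))

theorem inv_add (st : Option (String × Int) × Option Int)
    (P : List (String × Int × Int × String)) (e : String × Int × Int × String)
    (h : InvB st P) : InvB (bAdd st e) (P ++ [e]) := by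
  obtain ⟨b1, b2⟩ := st
  match b1 with
  | none =>
    obtain ⟨hP, hb2⟩ := h
    subst hP hb2
    simp [bAdd, InvB]
  | some (a1, e1) =>
    obtain ⟨⟨w, hwP, hw1, hw2⟩, hmax, hb2⟩ := h
    by_cases he : e.1 = a1
    · subst he
      simp only [bAdd]
      rw [if_pos (show (e.1 == e.1) = true by simp)]
      by_cases hlt : e1 < e.2.2.1
      · rw [if_pos hlt]
        refine ⟨⟨e, by simp, rfl, rfl⟩, ?_, ?_⟩
        · intro f hf
          rcases List.mem_append.1 hf with hf | hf
          · exact le_of_lt (lt_of_le_of_lt (hmax f hf) hlt)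
          · simp at hf; subst hf; rfl
        · match b2 with
          | none =>
            intro f hf
            rcases List.mem_append.1 hf with hf | hf
            · exact hb2 f hf
            · simp at hf; subst hf; rfl
          | some m =>
            obtain ⟨⟨v, hvP, hv1, hv2⟩, hm⟩ := hb2
            refine ⟨⟨v, by simp [hvP], hv1, hv2⟩, ?_⟩
            intro f hf hfne
            rcases List.mem_append.1 hf with hf | hf
            · exact hm f hf hfne
            · simp at hf; subst hf; exact absurd rfl hfne
      · rw [if_neg hlt]
        push_neg at hlt
        refine ⟨⟨w, by simp [hwP], hw1, hw2⟩, ?_, ?_⟩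
        · intro f hf
          rcases List.mem_append.1 hf with hf | hf
          · exact hmax f hf
          · simp at hf; subst hf; exact hlt
        · match b2 with
          | none =>
            intro f hf
            rcases List.mem_append.1 hf with hf | hf
            · exact hb2 f hf
            · simp at hf; subst hf; rfl
          | some m =>
            obtain ⟨⟨v, hvP, hv1, hv2⟩, hm⟩ := hb2
            refine ⟨⟨v, by simp [hvP], hv1, hv2⟩, ?_⟩
            intro f hf hfne
            rcases List.mem_append.1 hf with hf | hf
            · exact hm f hf hfne
            · simp at hf; subst hf; exact absurd rfl hfne
    · simp only [bAdd]
      rw [if_neg (show ¬((e.1 == a1) = true) by simp [he])]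
      by_cases hlt : e1 < e.2.2.1
      · rw [if_pos hlt]
        refine ⟨⟨e, by simp, rfl, rfl⟩, ?_, ?_, ?_⟩
        · intro f hf
          rcases List.mem_append.1 hf with hf | hf
          · exact le_of_lt (lt_of_le_of_lt (hmax f hf) hlt)
          · simp at hf; subst hf; rfl
        · exact ⟨w, by simp [hwP], by rw [hw1]; exact fun h' => he h'.symm, hw2⟩
        · intro f hf hfne
          rcases List.mem_append.1 hf with hf | hf
          · exact hmax f hf
          · simp at hf; subst hf; exact absurd rfl hfne
      · rw [if_neg hlt]
        push_neg at hlt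
        match b2 with
        | none =>
          refine ⟨⟨w, by simp [hwP], hw1, hw2⟩, ?_, ?_, ?_⟩
          · intro f hf
            rcases List.mem_append.1 hf with hf | hf
            · exact hmax f hf
            · simp at hf; subst hf; exact hlt
          · exact ⟨e, by simp, he, rfl⟩
          · intro f hf hfne
            rcases List.mem_append.1 hf with hf | hf
            · exact absurd (hb2 f hf) hfne
            · simp at hf; subst hf; rfl
        | some m =>
          obtain ⟨⟨v, hvP, hv1, hv2⟩, hm⟩ := hb2
          refine ⟨⟨w, by simp [hwP], hw1, hw2⟩, ?_, ?_, ?_⟩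
          · intro f hf
            rcases List.mem_append.1 hf with hf | hf
            · exact hmax f hf
            · simp at hf; subst hf; exact hlt
          · by_cases hme : m ≤ e.2.2.1
            · exact ⟨e, by simp, he, (max_eq_right hme).symm⟩
            · exact ⟨v, by simp [hvP], hv1, by rw [hv2]; exact (max_eq_left (not_le.mp hme).le).symm⟩
          · intro f hf hfne
            rcases List.mem_append.1 hf with hf | hf
            · exact le_max_of_le_left (hm f hf hfne)
            · simp at hf; subst hf; exact le_max_right _ _


theorem qry_iff (st : Option (String × Int) × Option Int)
    (P : List (String × Int × Int × String)) (e : String × Int × Int × String)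
    (h : InvB st P) :
    bQry st e = true ↔ ∃ f ∈ P, ¬(e.1 = f.1) ∧ e.2.2.1 ≤ f.2.2.1 := by
  obtain ⟨b1, b2⟩ := st
  match b1 with
  | none =>
    obtain ⟨hP, _⟩ := h
    subst hP
    simp [bQry]
  | some (a1, e1) =>
    obtain ⟨⟨w, hwP, hw1, hw2⟩, hmax, hb2⟩ := h
    by_cases ha : a1 = e.1
    · subst ha
      simp only [bQry]
      rw [if_neg (show ¬((e.1 != e.1) = true) by simp)]
      match b2, hb2 with
      | none, hb2 =>
        constructor
        · intro h'; exact absurd h' (by simp)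
        · rintro ⟨f, hf, hne, -⟩; exact absurd (hb2 f hf) (fun hh => hne hh.symm)
      | some m, hb2 =>
        obtain ⟨⟨v, hvP, hv1, hv2⟩, hm⟩ := hb2
        simp only [decide_eq_true_eq]
        constructor
        · intro hle
          exact ⟨v, hvP, fun hh => hv1 hh.symm, by rw [hv2]; exact hle⟩
        · rintro ⟨f, hf, hne, hle⟩
          exact hle.trans (hm f hf (fun hh => hne hh.symm))
    · simp only [bQry]
      rw [if_pos (show (a1 != e.1) = true by simpa using ha)]
      simp only [decide_eq_true_eq]
      constructor
      · intro hle
        refine ⟨w, hwP, ?_, by rw [hw2]; exact hle⟩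
        rw [hw1]; exact fun hh => ha hh.symm
      · rintro ⟨f, hf, hne, hle⟩
        exact hle.trans (hmax f hf)

theorem inv_foldl (Q : List (Int × (String × Int × Int × String))) :
    ∀ (st : Option (String × Int) × Option Int) (P : List (String × Int × Int × String)),
    InvB st P →
    InvB (Q.foldl (fun a p => bAdd a p.2) st) (P ++ Q.map (·.2)) := by
  induction Q with
  | nil => intro st P h; simpa using h
  | cons q Q ih =>
    intro st P h
    have := ih (bAdd st q.2) (P ++ [q.2]) (inv_add st P q.2 h)
    simpa using this

theorem rmfold_untouched (st' : Option (String × Int) × Option Int)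
    (run : List (Int × (String × Int × Int × String))) :
    ∀ (rm : List Bool) (j : Nat), (∀ r ∈ run, r.1.toNat ≠ j) →
    (run.foldl (fun r p => if bQry st' p.2 then r.set p.1.toNat true else r) rm)[j]? = rm[j]? := by
  induction run with
  | nil => intro rm j _; rfl
  | cons a run ih =>
    intro rm j hj
    simp only [List.foldl_cons]
    rw [ih _ j (fun r hr => hj r (List.mem_cons_of_mem _ hr))]
    by_cases hq : bQry st' a.2 = true
    · rw [if_pos hq]
      rw [List.getElem?_set_ne (hj a List.mem_cons_self)]
    · rw [if_neg hq]

theorem rmfold_self (st' : Option (String × Int) × Option Int)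
    (run : List (Int × (String × Int × Int × String))) :
    ∀ (rm : List Bool), ((run.map (fun q => q.1.toNat)).Nodup) →
    ∀ r ∈ run, rm[r.1.toNat]? = some false →
    (run.foldl (fun r p => if bQry st' p.2 then r.set p.1.toNat true else r) rm)[r.1.toNat]?
      = some (bQry st' r.2) := by
  induction run with
  | nil => intro rm _ r hr; exact absurd hr (by simp)
  | cons a run ih =>
    intro rm hnd r hr hfalse
    rw [List.map_cons, List.nodup_cons] at hnd
    obtain ⟨hnotin, ndtail⟩ := hnd
    simp only [List.foldl_cons]
    rcases List.mem_cons.1 hr with rfl | hr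
    · obtain ⟨hlt, -⟩ := List.getElem?_eq_some_iff.1 hfalse
      rw [rmfold_untouched st' run _ _
        (fun r' hr' hEq => hnotin (by rw [← hEq]; exact List.mem_map_of_mem hr'))]
      by_cases hb : bQry st' r.2 = true
      · rw [if_pos hb, hb]
        simp [List.getElem?_set_self, hlt]
      · have hb' : bQry st' r.2 = false := by revert hb; cases bQry st' r.2 <;> simp
        rw [if_neg hb, hfalse, hb']
    · have hne : a.1.toNat ≠ r.1.toNat :=
        fun hEq => hnotin (by rw [hEq]; exact List.mem_map_of_mem hr)
      have hkeep : (if bQry st' a.2 = true then rm.set a.1.toNat true else rm)[r.1.toNat]? = some false := by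
        by_cases hb : bQry st' a.2 = true
        · rw [if_pos hb, List.getElem?_set_ne hne, hfalse]
        · rw [if_neg hb, hfalse]
      exact ih _ ndtail r hr hkeep

theorem dropWhile_head_false {α : Type} (p : α → Bool) (l : List α) (h : α) (t : List α)
    (hEq : l.dropWhile p = h :: t) : p h = false := by
  induction l with
  | nil => simp at hEq
  | cons a l ih =>
    rw [List.dropWhile_cons] at hEq
    by_cases hp : p a = true
    · rw [if_pos hp] at hEq; exact ih hEq
    · rw [if_neg hp] at hEq
      injection hEq with h1 h2
      subst h1
      revert hp; cases p a <;> simp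

def swPred (q : Int × (String × Int × Int × String)) :
    Int × (String × Int × Int × String) → Bool :=
  fun p => p.2.2.1 == q.2.2.1

theorem sweep_cons (q : Int × (String × Int × Int × String))
    (rest : List (Int × (String × Int × Int × String)))
    (st : Option (String × Int) × Option Int) (rm : List Bool) :
    bSweep (q :: rest) st rm =
      bSweep ((q :: rest).dropWhile (swPred q))
        (((q :: rest).takeWhile (swPred q)).foldl (fun a p => bAdd a p.2) st)
        (((q :: rest).takeWhile (swPred q)).foldl
          (fun r p =>
            if bQry (((q :: rest).takeWhile (swPred q)).foldl (fun a p => bAdd a p.2) st) p.2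
            then r.set p.1.toNat true else r) rm) := by
  simp only [bSweep]
  rfl

theorem sweep_spec (xs : List (String × Int × Int × String)) :
    ∀ (n : Nat) (M : List (Int × (String × Int × Int × String)))
      (st : Option (String × Int) × Option Int) (rm : List Bool)
      (P : List (String × Int × Int × String)),
    M.length ≤ n →
    InvB st P →
    (∀ f ∈ P, f ∈ xs) →
    (∀ q ∈ M, q.2 ∈ xs) →
    (∀ f ∈ xs, f ∈ P ∨ ∃ q ∈ M, q.2 = f) →
    (∀ f ∈ P, ∀ q ∈ M, f.2.1 < q.2.2.1) →
    M.Pairwise (fun a b => a.2.2.1 ≤ b.2.2.1) →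
    ((M.map (fun q => q.1.toNat)).Nodup) →
    (∀ q ∈ M, rm[q.1.toNat]? = some false) →
    (∀ q ∈ M, (bSweep M st rm)[q.1.toNat]? = some (cont xs q.2)) ∧
    (∀ j : Nat, (∀ q ∈ M, q.1.toNat ≠ j) → (bSweep M st rm)[j]? = rm[j]?) := by
  intro n
  induction n with
  | zero =>
    intro M st rm P hlen _ _ _ _ _ _ _ _
    match M, hlen with
    | [], _ => exact ⟨by simp, fun j _ => by simp [bSweep]⟩
  | succ n ih =>
    intro M st rm P hlen hInv hPxs hMxs hcov hstrict hpair hnd hfalse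
    match M with
    | [] => exact ⟨by simp, fun j _ => by simp [bSweep]⟩
    | q :: rest =>
      have hstep := sweep_cons q rest st rm
      set run := (q :: rest).takeWhile (swPred q) with hrun
      set rest' := (q :: rest).dropWhile (swPred q) with hrest'
      set st' := run.foldl (fun a p => bAdd a p.2) st with hst'
      set rm' := run.foldl
        (fun r p => if bQry st' p.2 then r.set p.1.toNat true else r) rm with hrm'
      have hqrun : q ∈ run := by
        rw [hrun, List.takeWhile_cons, if_pos (by simp [swPred])]
        exact List.mem_cons_self
      have hrunstart : ∀ r ∈ run, r.2.2.1 = q.2.2.1 := by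
        intro r hr
        have := List.mem_takeWhile_imp (hrun ▸ hr)
        simpa [swPred] using this
      have hMsplit : run ++ rest' = q :: rest := by
        rw [hrun, hrest']; exact List.takeWhile_append_dropWhile
      have hrunsub : run.Sublist (q :: rest) := hrun ▸ List.takeWhile_sublist _
      have hrestsub : rest'.Sublist (q :: rest) := hrest' ▸ List.dropWhile_sublist _
      have hrest_tail : rest' = rest.dropWhile (swPred q) := by
        rw [hrest', List.dropWhile_cons, if_pos (by simp [swPred])]
      have hqle : ∀ r ∈ rest, q.2.2.1 ≤ r.2.2.1 := (List.pairwise_cons.mp hpair).1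
      have hrestlt : ∀ r ∈ rest', q.2.2.1 < r.2.2.1 := by
        cases hre : rest' with
        | nil => simp
        | cons h t =>
          have hhead : swPred q h = false :=
            dropWhile_head_false (swPred q) (q :: rest) h t (hrest'.symm.trans hre)
          have hhne : ¬ h.2.2.1 = q.2.2.1 := by simpa [swPred] using hhead
          have hhmem : h ∈ rest := by
            have : h ∈ rest' := by rw [hre]; exact List.mem_cons_self
            rw [hrest_tail] at this
            exact (List.dropWhile_sublist _).subset this
          have hqh : q.2.2.1 < h.2.2.1 := lt_of_le_of_ne (hqle h hhmem) (fun hh' => hhne hh'.symm)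
          have hpair' : (h :: t).Pairwise (fun a b => a.2.2.1 ≤ b.2.2.1) := by
            rw [← hre]
            exact List.Pairwise.sublist hrestsub hpair
          intro r hr
          rcases List.mem_cons.1 hr with rfl | hr
          · exact hqh
          · exact hqh.trans_le ((List.pairwise_cons.mp hpair').1 r hr)
      have hInv' : InvB st' (P ++ run.map (·.2)) := inv_foldl run st P hInv
      have hchar : ∀ f, f ∈ P ++ run.map (·.2) ↔ (f ∈ xs ∧ f.2.1 ≤ q.2.2.1) := by
        intro f
        constructor
        · intro hf
          rcases List.mem_append.1 hf with hf | hf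
          · exact ⟨hPxs f hf, (hstrict f hf q List.mem_cons_self).le⟩
          · rcases List.mem_map.1 hf with ⟨r, hrrun, rfl⟩
            exact ⟨hMxs r (hrunsub.subset hrrun), le_of_eq (hrunstart r hrrun)⟩
        · rintro ⟨hfxs, hfle⟩
          rcases hcov f hfxs with h | ⟨q', hq', rfl⟩
          · exact List.mem_append_left _ h
          · have hq'' : q' ∈ run ++ rest' := hMsplit ▸ hq'
            rcases List.mem_append.1 hq'' with h | h
            · exact List.mem_append_right _ (List.mem_map_of_mem h)
            · exact absurd hfle (not_le.mpr (hrestlt q' h))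
      have hcq : ∀ r ∈ run, bQry st' r.2 = cont xs r.2 := by
        intro r hr
        have h1 := qry_iff st' (P ++ run.map (·.2)) r.2 hInv'
        have h2 := cont_iff xs r.2
        by_cases hcc : cont xs r.2 = true
        · rw [hcc, h1]
          rcases h2.1 hcc with ⟨f, hfxs, hne, hfs, hfe⟩
          exact ⟨f, (hchar f).2 ⟨hfxs, hfs.trans (le_of_eq (hrunstart r hr))⟩, hne, hfe⟩
        · have hcf : cont xs r.2 = false := by revert hcc; cases cont xs r.2 <;> simp
          rw [hcf]
          by_contra hq'
          have hq'' : bQry st' r.2 = true := by revert hq'; cases bQry st' r.2 <;> simp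
          rcases h1.1 hq'' with ⟨f, hfP, hne, hfe⟩
          obtain ⟨hfxs, hfle⟩ := (hchar f).1 hfP
          exact hcc (h2.2 ⟨f, hfxs, hne, hfle.trans (le_of_eq (hrunstart r hr).symm), hfe⟩)
      have hnd2 : ((run ++ rest').map (fun q => q.1.toNat)).Nodup := by
        rw [hMsplit]; exact hnd
      rw [List.map_append, List.nodup_append] at hnd2
      obtain ⟨ndr, ndres, hdisj0⟩ := hnd2
      have hdisj : ∀ x, x ∈ run.map (fun q => q.1.toNat) →
          x ∈ rest'.map (fun q => q.1.toNat) → False := fun x hx hy => hdisj0 x hx x hy rfl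
      have hfalse_rest : ∀ r ∈ rest', rm'[r.1.toNat]? = some false := by
        intro r hr
        rw [hrm', rmfold_untouched st' run rm r.1.toNat
          (fun a ha hEq => hdisj a.1.toNat (List.mem_map_of_mem ha)
            (by rw [hEq]; exact List.mem_map_of_mem hr))]
        exact hfalse r (hrestsub.subset hr)
      have hlen' : rest'.length ≤ n := by
        have h1 : rest'.length ≤ rest.length := by
          rw [hrest_tail]; exact List.length_dropWhile_le _ _
        simp only [List.length_cons] at hlen
        omega
      obtain ⟨ih1, ih2⟩ := ih rest' st' rm' (P ++ run.map (·.2)) hlen' hInv'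
        (fun f hf => ((hchar f).1 hf).1)
        (fun q' h => hMxs q' (hrestsub.subset h))
        (by
          intro f hf
          rcases hcov f hf with h | ⟨q', hq', rfl⟩
          · exact Or.inl (List.mem_append_left _ h)
          · have hq'' : q' ∈ run ++ rest' := hMsplit ▸ hq'
            rcases List.mem_append.1 hq'' with h | h
            · exact Or.inl (List.mem_append_right _ (List.mem_map_of_mem h))
            · exact Or.inr ⟨q', h, rfl⟩)
        (by
          intro f hf q' hq'
          rcases List.mem_append.1 hf with h | h
          · exact hstrict f h q' (hrestsub.subset hq')
          · rcases List.mem_map.1 h with ⟨r, hr, rfl⟩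
            have := hrestlt q' hq'
            rw [← hrunstart r hr] at this
            exact this)
        (List.Pairwise.sublist hrestsub hpair)
        ndres
        hfalse_rest
      constructor
      · intro q₀ hq₀
        rw [hstep]
        have hq₀' : q₀ ∈ run ++ rest' := hMsplit ▸ hq₀
        rcases List.mem_append.1 hq₀' with h | h
        · rw [ih2 q₀.1.toNat
            (fun q' hq' hEq => hdisj q₀.1.toNat (List.mem_map_of_mem h)
              (by rw [← hEq]; exact List.mem_map_of_mem hq'))]
          rw [hrm', rmfold_self st' run rm ndr q₀ h (hfalse q₀ (hrunsub.subset h)), hcq q₀ h]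
        · exact ih1 q₀ h
      · intro j hj
        rw [hstep, ih2 j (fun q' hq' => hj q' (hrestsub.subset hq')), hrm',
          rmfold_untouched st' run rm j (fun r hr => hj r (hrunsub.subset hr))]

theorem removed_eq (xs : List (String × Int × Int × String)) :
    bSweep (PySem.List.sorted (PySem.List.enumerate xs) (fun p => p.2.2.1) false)
      (none, none) (List.replicate xs.length false) = xs.map (cont xs) := by
  set L := PySem.List.sorted (PySem.List.enumerate xs) (fun p => p.2.2.1) false with hL
  have hmemL : ∀ q ∈ L, ∃ k : Nat, ∃ _ : k < xs.length, q = ((k : Int), xs[k]) := by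
    intro q hq
    rw [hL, PySem.List.mem_sorted] at hq
    rcases (PySem.List.mem_enumerate_iff _ _ _).1 hq with ⟨k, hk, hkq⟩
    exact ⟨k, hk, by simpa using hkq⟩
  have hcontains : ∀ (k : Nat) (hk : k < xs.length), ((k : Int), xs[k]'hk) ∈ L := by
    intro k hk
    rw [hL, PySem.List.mem_sorted]
    refine (PySem.List.mem_enumerate_iff _ _ _).2 ⟨k, hk, ?_⟩
    simp
  have hnd : (L.map (fun q => q.1.toNat)).Nodup := by
    have hperm : L.Perm (PySem.List.enumerate xs) := PySem.List.sorted_perm _ _ _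
    have hpermf := hperm.map (fun q : Int × (String × Int × Int × String) => q.1)
    have hndfst : ((PySem.List.enumerate xs).map (fun q => q.1)).Nodup := by
      rw [PySem.List.map_fst_enumerate]
      exact PySem.List.nodup_pyRange_one _ _
    have hndL : (L.map (fun q : Int × (String × Int × Int × String) => q.1)).Nodup :=
      hpermf.nodup_iff.mpr hndfst
    have hnonneg : ∀ x ∈ L.map (fun q : Int × (String × Int × Int × String) => q.1), 0 ≤ x := by
      intro x hx
      have hx2 : x ∈ (PySem.List.enumerate xs).map (fun q => q.1) := hpermf.mem_iff.mp hx
      rw [PySem.List.map_fst_enumerate] at hx2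
      rw [PySem.List.mem_pyRange_one] at hx2
      omega
    have heq : L.map (fun q => q.1.toNat)
        = (L.map (fun q : Int × (String × Int × Int × String) => q.1)).map Int.toNat := by
      rw [List.map_map]; rfl
    rw [heq]
    exact hndL.map_on (fun x hx y hy hxy => by
      have h1 := hnonneg x hx
      have h2 := hnonneg y hy
      omega)
  have hmain := sweep_spec xs L.length L (none, none) (List.replicate xs.length false) []
    le_rfl ⟨rfl, rfl⟩ (by simp)
    (by
      intro q hq
      rcases hmemL q hq with ⟨k, hk, rfl⟩
      exact List.getElem_mem hk)
    (by
      intro f hf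
      rcases List.mem_iff_getElem.1 hf with ⟨k, hk, rfl⟩
      exact Or.inr ⟨((k : Int), xs[k]), hcontains k hk, rfl⟩)
    (by simp)
    (by
      have := PySem.List.sorted_pairwise (PySem.List.enumerate xs)
        (fun p : Int × (String × Int × Int × String) => p.2.2.1)
      simpa [hL] using this)
    hnd
    (by
      intro q hq
      rcases hmemL q hq with ⟨k, hk, rfl⟩
      simp [hk])
  apply List.ext_getElem?
  intro j
  by_cases hj : j < xs.length
  · have h1 := hmain.1 ((j : Int), xs[j]) (hcontains j hj)
    simp only [Int.toNat_natCast] at h1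
    rw [h1]
    simp [hj]
  · rw [hmain.2 j (by
      intro q hq
      rcases hmemL q hq with ⟨k, hk, rfl⟩
      simp only [Int.toNat_natCast]
      omega)]
    have h1 : (List.replicate xs.length false)[j]? = none := by
      rw [List.getElem?_eq_none]
      simpa using Nat.le_of_not_lt hj
    have h2 : (xs.map (cont xs))[j]? = none := by
      rw [List.getElem?_eq_none]
      simpa using Nat.le_of_not_lt hj
    rw [h1, h2]

theorem zipfilter (xs : List (String × Int × Int × String))
    (f : (String × Int × Int × String) → Bool) :
    ((xs.zip (xs.map f)).filter (fun p => !p.2)).map (·.1) = xs.filter (fun t => !f t) := by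
  induction xs with
  | nil => rfl
  | cons x t ih =>
    by_cases h : f x = true <;>
      simp [List.zip_cons_cons, List.filter_cons, h, ih]

theorem B_eq (xs : List (String × Int × Int × String)) :
    remove_subset_entities_alt xs = (xs.any (cont xs), xs.filter (fun t => !cont xs t)) := by
  unfold remove_subset_entities_alt
  simp only [removed_eq, zipfilter, List.any_map]
  constructor

-- ===== VERDICT (by name: the statement is the Claim_ definition above) =====
theorem remove_subset_entities_spec : Claim_equal_remove_subset_entities := by
  intro xs _
  unfold Spec_remove_subset_entities
  rw [A_eq, B_eq]
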